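-- pv_equiv track=rewrite | github.com/Artemish/minecraft-magnets | sprites.py | pack_into_lists
-- ===== SOURCE A (Python) =====
-- def pack_into_lists(counts, width, height):
--     all_counts = [[key]  * counts[key]  for key in counts]
--     all_num = []
--     for count_group in all_counts:
--         all_num.extend(count_group)
--     by_sheet = [all_num[x:x+width*height] for x in range(0, len(all_num), width*height)]
--
--     sheets = []
--     for sheet in by_sheet:
--         rows = [sheet[x:x+width] for x in range(0, len(sheet), width)]
--         sheets.append(rows)
--
--     return sheets
-- ===== SOURCE B (Python) =====
-- def pack_into_lists(counts, width, height):
--     if width <= 0 or height <= 0: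
--         return []
--     sheets = []
--     sheet = []
--     row = []
--     for key, n in counts.items():
--         for _ in range(n):
--             row.append(key)
--             if len(row) == width:
--                 sheet.append(row)
--                 row = []
--                 if len(sheet) == height:
--                     sheets.append(sheet)
--                     sheet = []
--     if row:
--         sheet.append(row)
--     if sheet:
--         sheets.append(sheet)
--     return sheets
-- ===== Notes on version B (the rewrite author's own statement) =====
-- stated objective: alternative
-- what changed: Replaced A's build-a-flat-list-then-slice-twice pipeline (range/slice comprehensions) by a single pass over the counts with three accumulators (sheets, current sheet, current row) that closes rows at width and sheets at height, after rejecting degenerate grids up front.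
-- outside the precondition, e.g. on pack_into_lists({1: 2}, -1, -2): A returns [[]], B returns []
import Mathlib
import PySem

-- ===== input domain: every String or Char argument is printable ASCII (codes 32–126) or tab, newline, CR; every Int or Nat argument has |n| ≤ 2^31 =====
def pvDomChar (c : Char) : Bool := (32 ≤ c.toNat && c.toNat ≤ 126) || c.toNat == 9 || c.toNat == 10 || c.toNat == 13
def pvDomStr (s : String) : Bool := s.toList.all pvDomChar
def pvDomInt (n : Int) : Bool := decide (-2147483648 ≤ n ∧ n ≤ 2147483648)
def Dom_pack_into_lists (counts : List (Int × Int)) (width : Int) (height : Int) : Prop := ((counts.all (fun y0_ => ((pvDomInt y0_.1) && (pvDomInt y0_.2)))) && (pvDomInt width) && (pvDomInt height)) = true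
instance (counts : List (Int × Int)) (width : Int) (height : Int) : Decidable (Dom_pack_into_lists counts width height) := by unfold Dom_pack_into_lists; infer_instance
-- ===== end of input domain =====

-- B replaces A's build-flat-list-then-slice-twice pipeline by a single pass with three
-- accumulators (sheets / current sheet / current row); alternative decomposition, same cost.

-- ===== PORT A =====
-- Literal port of A: build all_counts ([key]*counts[key] per key), extend into all_num,
-- slice into sheets of width*height, then each sheet into rows of width.
def pack_into_lists (counts : List (Int × Int)) (width : Int) (height : Int) : List (List (List Int)) :=
  let d := PySem.Dict.mk counts
  let all_counts := (PySem.Dict.keys d).map (fun key => List.replicate (PySem.Dict.getD d key 0).toNat key)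
  let all_num := all_counts.foldl (fun acc g => acc ++ g) []
  let by_sheet := (PySem.List.pyRange 0 (all_num.length : Int) (width * height)).map
      (fun x => PySem.List.slice all_num (some x) (some (x + width * height)))
  by_sheet.foldl (fun sheets sheet =>
    sheets ++ [(PySem.List.pyRange 0 (sheet.length : Int) width).map
      (fun x => PySem.List.slice sheet (some x) (some (x + width)))]) []

-- ===== PORT B =====
-- one step of B's single pass: append key to the current row, closing full rows and full sheets
def packStep (width height : Int) (st : List (List (List Int)) × List (List Int) × List Int)
    (key : Int) : List (List (List Int)) × List (List Int) × List Int :=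
  let (sheets, sheet, row) := st
  let row := row ++ [key]
  if (row.length : Int) = width then
    let sheet := sheet ++ [row]
    if (sheet.length : Int) = height then (sheets ++ [sheet], [], [])
    else (sheets, sheet, [])
  else (sheets, sheet, row)

def pack_into_lists_alt (counts : List (Int × Int)) (width : Int) (height : Int) : List (List (List Int)) :=
  if width ≤ 0 ∨ height ≤ 0 then [] else
  let st := counts.foldl (fun st kv => (List.replicate kv.2.toNat kv.1).foldl (packStep width height) st)
    (([] : List (List (List Int))), ([] : List (List Int)), ([] : List Int))
  let (sheets, sheet, row) := st
  let sheet := if row ≠ [] then sheet ++ [row] else sheet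
  if sheet ≠ [] then sheets ++ [sheet] else sheets

-- ===== PRECONDITION & SPEC =====
-- Pre_ excludes (a) width*height == 0, where Python A raises ValueError (range step 0);
-- (b) width < 0 and height < 0 together with some positive count, where A returns a nonempty
-- list of empty sheets — an accident of Python's negative slice/range semantics — and either
-- value is defensible for a degenerate grid; and (c) lists with duplicate keys, which never
-- arise from a Python dict.
def Pre_pack_into_lists (counts : List (Int × Int)) (width : Int) (height : Int) : Prop :=
  (counts.map Prod.fst).Nodup ∧ width * height ≠ 0 ∧
    ¬(width < 0 ∧ height < 0 ∧ ∃ kv ∈ counts, 0 < kv.2)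
instance (counts : List (Int × Int)) (width : Int) (height : Int) : Decidable (Pre_pack_into_lists counts width height) := by unfold Pre_pack_into_lists; infer_instance

def pvWitness_pack_into_lists : (List (Int × Int)) × Int × Int := ([(1, 2), (2, 3)], 2, 2)

def Spec_pack_into_lists (counts : List (Int × Int)) (width : Int) (height : Int) (out : List (List (List Int))) : Prop := out = pack_into_lists_alt counts width height
instance (counts : List (Int × Int)) (width : Int) (height : Int) (out : List (List (List Int))) : Decidable (Spec_pack_into_lists counts width height out) := by unfold Spec_pack_into_lists; infer_instance

-- ===== CLAIM (what is proved, stated in full; the proofs are below) =====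
def Claim_equal_pack_into_lists : Prop := ∀ (counts : List (Int × Int)) (width : Int) (height : Int), Dom_pack_into_lists counts width height → Pre_pack_into_lists counts width height → Spec_pack_into_lists counts width height (pack_into_lists counts width height)
-- ===== LEMMAS AND PROOFS =====

-- chunking a list into consecutive pieces of n elements (the common normal form of both ports)
def chunks {α : Type} (n : Nat) (l : List α) : List (List α) :=
  if _h : n = 0 ∨ l = [] then [] else l.take n :: chunks n (l.drop n)
  termination_by l.length
  decreasing_by
    rw [not_or] at _h
    have : l ≠ [] := _h.2
    have : 0 < l.length := List.length_pos_iff.mpr this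
    simp [List.length_drop]; omega

lemma chunks_nil {α : Type} (n : Nat) : chunks (α := α) n [] = [] := by
  rw [chunks]; simp

lemma chunks_of_ne {α : Type} {n : Nat} {l : List α} (hn : n ≠ 0) (hl : l ≠ []) :
    chunks n l = l.take n :: chunks n (l.drop n) := by
  rw [chunks]; simp [hn, hl]

lemma chunks_append {α : Type} {n : Nat} {a : List α} (b : List α)
    (hn : n ≠ 0) (ha : a.length = n) : chunks n (a ++ b) = a :: chunks n b := by
  have hane : a ≠ [] := by intro h; subst h; simp at ha; omega
  rw [chunks_of_ne hn (by simp [hane])]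
  congr 1
  · rw [← ha]; simp
  · congr 1; rw [← ha]; simp

lemma chunks_short {α : Type} {n : Nat} {a : List α} (hn : n ≠ 0) (ha : a.length ≤ n) :
    chunks n a = if a = [] then [] else [a] := by
  by_cases h : a = []
  · simp [h, chunks_nil]
  · rw [chunks_of_ne hn h]
    simp [h, List.take_of_length_le ha, List.drop_eq_nil_of_le ha, chunks_nil]

-- pyRange facts for a general positive step (no PySem lemma covers the cons/shift shapes)
lemma pyRange_pos_nil {a b s : Int} (hs : 0 < s) (h : b ≤ a) :
    PySem.List.pyRange a b s = [] := by
  rw [PySem.List.pyRange_of_pos _ _ hs]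
  simp [show ¬ a < b by omega]

lemma pyRange_pos_shift (a b s : Int) (hs : 0 < s) :
    PySem.List.pyRange (a + s) (b + s) s = (PySem.List.pyRange a b s).map (· + s) := by
  rw [PySem.List.pyRange_of_pos _ _ hs, PySem.List.pyRange_of_pos _ _ hs]
  simp only [List.map_map]
  rw [show b + s - (a + s) + s - 1 = b - a + s - 1 by ring]
  simp only [add_lt_add_iff_right]
  apply List.map_congr_left
  intro k _
  simp [Function.comp]; ring

lemma pyRange_pos_cons {a b s : Int} (hs : 0 < s) (h : a < b) :
    PySem.List.pyRange a b s = a :: PySem.List.pyRange (a + s) b s := by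
  rw [PySem.List.pyRange_of_pos _ _ hs, PySem.List.pyRange_of_pos _ _ hs]
  have hs0 : s ≠ 0 := by omega
  have hkey : (b - a + s - 1) / s = (b - a - 1) / s + 1 := by
    have : b - a + s - 1 = (b - a - 1) + 1 * s := by ring
    rw [this, Int.add_mul_ediv_right _ _ hs0]
  by_cases h2 : a + s < b
  · have hkey2 : (b - (a + s) + s - 1) / s = (b - a - 1 - s) / s + 1 := by
      have : b - (a + s) + s - 1 = (b - a - 1 - s) + 1 * s := by ring
      rw [this, Int.add_mul_ediv_right _ _ hs0]
    have hkey3 : (b - a - 1) / s = (b - a - 1 - s) / s + 1 := by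
      have h3 : b - a - 1 = (b - a - 1 - s) + 1 * s := by ring
      conv_lhs => rw [h3]
      rw [Int.add_mul_ediv_right _ _ hs0]
    have hnn : 0 ≤ (b - a - 1 - s) / s := Int.ediv_nonneg (by omega) (by omega)
    rw [if_pos h, if_pos h2, hkey, hkey2, hkey3]
    rw [show ((b - a - 1 - s) / s + 1 + 1).toNat = ((b - a - 1 - s) / s + 1).toNat + 1 by omega]
    rw [List.range_succ_eq_map]
    simp only [List.map_cons, List.map_map]
    congr 1
    · simp
    · apply List.map_congr_left
      intro k _
      simp [Function.comp, Nat.succ_eq_add_one]; ring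
  · have hz : (b - a - 1) / s = 0 := by
      apply Int.ediv_eq_zero_of_lt <;> omega
    rw [if_pos h, if_neg h2, hkey, hz]
    simp
lemma mem_pyRange_pos_nonneg {s n x : Int} (hs : 0 < s)
    (hx : x ∈ PySem.List.pyRange 0 n s) : 0 ≤ x := by
  rw [PySem.List.pyRange_of_pos _ _ hs] at hx
  simp at hx
  obtain ⟨k, _, hk⟩ := hx
  have : 0 ≤ s * (k : Int) := by positivity
  omega

lemma pyRange_neg_nil {a b s : Int} (hs : s < 0) (h : a ≤ b) :
    PySem.List.pyRange a b s = [] := by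
  simp [PySem.List.pyRange, show s ≠ 0 by omega, show ¬(0 < s) by omega, show ¬(b < a) by omega]

-- A's slice comprehension over range(0, len, s) is chunking into pieces of s
lemma sliceChunks {s : Int} (hs : 0 < s) : ∀ l : List Int,
    (PySem.List.pyRange 0 (l.length : Int) s).map
      (fun x => PySem.List.slice l (some x) (some (x + s))) = chunks s.toNat l := by
  intro l
  induction hlen : l.length using Nat.strong_induction_on generalizing l with
  | _ n ih =>
  subst hlen
  by_cases hl : l = []
  · subst hl; simp [pyRange_pos_nil hs, chunks_nil]
  · have hlp : 0 < l.length := List.length_pos_iff.mpr hl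
    rw [pyRange_pos_cons hs (by exact_mod_cast hlp)]
    rw [chunks_of_ne (by omega) hl]
    simp only [List.map_cons]
    congr 1
    · rw [PySem.List.slice_toNat _ le_rfl (by omega)]
      simp
    · have hdrop : ((l.drop s.toNat).length : Int) = (l.length : Int) - s ∨ l.drop s.toNat = [] := by
        by_cases hc : s.toNat ≤ l.length
        · left; simp [List.length_drop]; omega
        · right; apply List.drop_eq_nil_of_le; omega
      have hshift : PySem.List.pyRange (0 + s) ((l.length : Int)) s
          = (PySem.List.pyRange 0 ((l.length : Int) - s) s).map (· + s) := by
        conv_lhs => rw [show ((l.length : Int)) = ((l.length : Int) - s) + s by ring]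
        exact pyRange_pos_shift 0 _ s hs
      rw [hshift, List.map_map]
      have hrec : (PySem.List.pyRange 0 ((l.drop s.toNat).length : Int) s).map
          (fun x => PySem.List.slice (l.drop s.toNat) (some x) (some (x + s)))
          = chunks s.toNat (l.drop s.toNat) :=
        ih (l.drop s.toNat).length (by simp [List.length_drop]; omega) _ rfl
      rw [← hrec]
      rcases hdrop with hd | hd
      · rw [hd]
        apply List.map_congr_left
        intro y hy
        have hy0 : 0 ≤ y := mem_pyRange_pos_nonneg hs hy
        simp only [Function.comp_apply]
        rw [PySem.List.slice_toNat _ (by omega) (by omega),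
            PySem.List.slice_toNat _ (by omega) (by omega)]
        rw [List.drop_drop]
        have e2 : (y + s + s).toNat - (y + s).toNat = (y + s).toNat - y.toNat := by omega
        rw [e2]
        have e1 : y.toNat + s.toNat = (y + s).toNat := by omega
        first
          | rw [e1]
          | (rw [show s.toNat + y.toNat = (y + s).toNat by omega])
      · have hle : (l.length : Int) - s ≤ 0 := by
          have := List.drop_eq_nil_iff.mp hd
          omega
        rw [pyRange_pos_nil hs hle, hd]
        rw [show (([] : List Int).length : Int) = 0 by simp, pyRange_pos_nil hs le_rfl]
        simp

-- chunking twice (rows of w, then sheets of h rows) equals A's chunk-of-w*h-then-rows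
lemma chunks_take {α : Type} {w : Nat} (hw : w ≠ 0) : ∀ (h : Nat) (l : List α),
    chunks w (l.take (w * h)) = (chunks w l).take h := by
  intro h
  induction h with
  | zero => intro l; simp [chunks_nil]
  | succ h ih =>
    intro l
    simp only [Nat.mul_succ]
    by_cases hl : l = []
    · subst hl; simp [chunks_nil]
    · rw [chunks_of_ne hw hl]
      have hne : l.take (w * h + w) ≠ [] := by
        simp [List.take_eq_nil_iff]; tauto
      rw [chunks_of_ne hw hne]
      simp only [List.take_succ_cons]
      congr 1
      · rw [List.take_take]; congr 1; omega
      · rw [← ih (l.drop w)]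
        congr 1
        rw [List.drop_take]
        congr 1
        omega

lemma chunks_drop {α : Type} {w : Nat} (hw : w ≠ 0) : ∀ (h : Nat) (l : List α),
    chunks w (l.drop (w * h)) = (chunks w l).drop h := by
  intro h
  induction h with
  | zero => intro l; simp
  | succ h ih =>
    intro l
    simp only [Nat.mul_succ]
    by_cases hl : l = []
    · subst hl; simp [chunks_nil]
    · rw [chunks_of_ne hw hl]
      simp only [List.drop_succ_cons]
      rw [← ih (l.drop w), List.drop_drop, Nat.add_comm]

lemma chunks_chunks {w h : Nat} (hw : w ≠ 0) (hh : h ≠ 0) : ∀ l : List Int,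
    (chunks (w * h) l).map (chunks w) = chunks h (chunks w l) := by
  intro l
  induction hlen : l.length using Nat.strong_induction_on generalizing l with
  | _ n ih =>
  subst hlen
  by_cases hl : l = []
  · subst hl; simp [chunks_nil]
  · have hwh : w * h ≠ 0 := by positivity
    rw [chunks_of_ne hwh hl]
    have hcne : chunks w l ≠ [] := by
      rw [chunks_of_ne hw hl]; simp
    rw [chunks_of_ne hh hcne]
    simp only [List.map_cons]
    congr 1
    · rw [chunks_take hw h l]
    · rw [← chunks_drop hw h l]
      have hlp : 0 < l.length := List.length_pos_iff.mpr hl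
      exact ih (l.drop (w * h)).length (by simp [List.length_drop]; omega) _ rfl

-- flushing B's accumulator state into the final list of sheets (B's post-loop code)
def packFlush (st : List (List (List Int)) × List (List Int) × List Int) : List (List (List Int)) :=
  let (sheets, sheet, row) := st
  let sheet := if row ≠ [] then sheet ++ [row] else sheet
  if sheet ≠ [] then sheets ++ [sheet] else sheets

-- B's loop invariant: the flushed fold equals emitted sheets ++ chunking of what remains
lemma packStep_invariant {width height : Int} (hw : 0 < width) (hh : 0 < height) :
    ∀ (l : List Int) (S : List (List (List Int))) (sh : List (List Int)) (r : List Int),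
    (r.length : Int) < width → ((sh.length : Int)) < height →
    packFlush (l.foldl (packStep width height) (S, sh, r))
      = S ++ chunks height.toNat (sh ++ chunks width.toNat (r ++ l)) := by
  intro l
  induction l with
  | nil =>
    intro S sh r hr hsh
    simp only [List.foldl_nil, List.append_nil]
    rw [chunks_short (n := width.toNat) (by omega) (by omega)]
    by_cases hrn : r = []
    · subst hrn
      rw [if_pos rfl, List.append_nil]
      rw [chunks_short (n := height.toNat) (by omega) (by omega)]
      by_cases hs : sh = []
      · subst hs; rw [if_pos rfl]; simp [packFlush]
      · rw [if_neg hs]; simp [packFlush, hs]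
    · rw [if_neg hrn]
      rw [chunks_short (n := height.toNat) (by omega)
        (by rw [List.length_append]; simp; omega)]
      rw [if_neg (by simp)]
      simp [packFlush, hrn]
  | cons x l ih =>
    intro S sh r hr hsh
    simp only [List.foldl_cons]
    show packFlush (l.foldl (packStep width height) (packStep width height (S, sh, r) x)) = _
    rw [packStep]
    simp only []
    by_cases hrow : ((r ++ [x]).length : Int) = width
    · rw [if_pos hrow]
      have hrl : (r ++ [x]).length = width.toNat := by
        rw [List.length_append] at hrow ⊢; simp at hrow ⊢; omega
      have hchw : chunks width.toNat (r ++ x :: l) = (r ++ [x]) :: chunks width.toNat l := by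
        rw [show r ++ x :: l = (r ++ [x]) ++ l by simp]
        exact chunks_append l (by omega) hrl
      by_cases hsheet : ((sh ++ [r ++ [x]]).length : Int) = height
      · rw [if_pos hsheet]
        have hshl : (sh ++ [r ++ [x]]).length = height.toNat := by
          rw [List.length_append] at hsheet ⊢; simp at hsheet ⊢; omega
        rw [ih _ _ _ (by simp; omega) (by simp; omega)]
        rw [hchw, show sh ++ (r ++ [x]) :: chunks width.toNat l
            = (sh ++ [r ++ [x]]) ++ chunks width.toNat l by simp]
        rw [chunks_append _ (by omega) hshl]
        simp
      · rw [if_neg hsheet]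
        have hshl : ((sh ++ [r ++ [x]]).length : Int) < height := by
          rw [List.length_append] at hsheet ⊢
          simp at hsheet ⊢
          omega
        rw [ih _ _ _ (by simp; omega) hshl]
        rw [hchw]
        simp
    · rw [if_neg hrow]
      have hrl : ((r ++ [x]).length : Int) < width := by
        rw [List.length_append] at hrow ⊢
        simp at hrow ⊢
        omega
      rw [ih _ _ _ hrl hsh]
      congr 2
      simp

-- the flat list both ports expand counts into, with distinct keys
lemma flat_eq (counts : List (Int × Int)) (hnd : (counts.map Prod.fst).Nodup) :
    (PySem.Dict.keys (PySem.Dict.mk counts)).map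
        (fun key => List.replicate (PySem.Dict.getD (PySem.Dict.mk counts) key 0).toNat key)
      = counts.map (fun kv => List.replicate kv.2.toNat kv.1) := by
  have hkeys : PySem.Dict.keys (PySem.Dict.mk counts) = counts.map Prod.fst := rfl
  rw [hkeys, List.map_map]
  apply List.map_congr_left
  intro kv hkv
  simp only [Function.comp]
  congr 2
  exact PySem.Dict.getD_of_mem_items (PySem.Dict.mk counts)
    (by simpa using hkv) (by simpa using hnd) 0

-- ===== VERDICT (by name: the statement is the Claim_ definition above) =====
theorem pack_into_lists_spec : Claim_equal_pack_into_lists := by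
  intro counts width height _hdom hpre
  obtain ⟨hnd, hwh, hnn⟩ := hpre
  unfold Spec_pack_into_lists pack_into_lists pack_into_lists_alt
  simp only []
  rw [flat_eq counts hnd]
  set flat := (counts.map (fun kv => List.replicate kv.2.toNat kv.1)).flatten with hflat
  have h1 : (counts.map (fun kv => List.replicate kv.2.toNat kv.1)).foldl (fun acc g => acc ++ g) [] = flat := by
    rw [hflat]
    simpa using PySem.List.foldl_append_eq_flatMap (fun x : List Int => x)
      (counts.map (fun kv => List.replicate kv.2.toNat kv.1)) []
  rw [h1]
  by_cases hpos : 0 < width ∧ 0 < height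
  case neg =>
    -- a degenerate grid: B's up-front validation returns []; A also produces no sheets
    have hguard : width ≤ 0 ∨ height ≤ 0 := by
      rcases not_and_or.mp hpos with h | h
      · left; omega
      · right; omega
    rw [if_pos hguard]
    by_cases hboth : width < 0 ∧ height < 0
    · -- both dimensions negative: Pre_ forces every count nonpositive, so the flat list is empty
      have hall : ∀ kv ∈ counts, kv.2 ≤ 0 := by
        intro kv hkv
        by_contra hc
        exact hnn ⟨hboth.1, hboth.2, kv, hkv, by omega⟩
      have hflat0 : flat = [] := by
        rw [hflat, List.flatten_eq_nil_iff]
        intro l hl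
        simp only [List.mem_map] at hl
        obtain ⟨kv, hkv, rfl⟩ := hl
        have := hall kv hkv
        simp [List.replicate_eq_nil_iff]
        omega
      have hper : 0 < width * height := mul_pos_of_neg_of_neg hboth.1 hboth.2
      rw [hflat0, show ((([] : List Int)).length : Int) = 0 by simp,
        pyRange_pos_nil hper le_rfl]
      simp
    · -- mixed signs: width*height < 0, so A's range is empty
      have hper : width * height < 0 := by
        rcases lt_trichotomy width 0 with hw | hw | hw
        · rcases lt_trichotomy height 0 with hh | hh | hh
          · exact absurd ⟨hw, hh⟩ hboth
          · exact absurd (by rw [hh, mul_zero]) hwh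
          · exact mul_neg_of_neg_of_pos hw hh
        · exact absurd (by rw [hw, zero_mul]) hwh
        · rcases lt_trichotomy height 0 with hh | hh | hh
          · exact mul_neg_of_pos_of_neg hw hh
          · exact absurd (by rw [hh, mul_zero]) hwh
          · exact absurd ⟨hw, hh⟩ hpos
      rw [pyRange_neg_nil hper (by positivity)]
      simp
  obtain ⟨hw, hh⟩ := hpos
  rw [if_neg (by omega : ¬(width ≤ 0 ∨ height ≤ 0))]
  have h2 : counts.foldl (fun st kv => (List.replicate kv.2.toNat kv.1).foldl (packStep width height) st)
      (([] : List (List (List Int))), ([] : List (List Int)), ([] : List Int))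
      = flat.foldl (packStep width height) ([], [], []) := by
    rw [hflat, ← List.flatMap_def, List.foldl_flatMap]
  rw [h2]
  have hB := packStep_invariant hw hh flat [] [] [] (by simpa using hw) (by simpa using hh)
  have hBfl : packFlush (flat.foldl (packStep width height) ([], [], []))
      = chunks height.toNat (chunks width.toNat flat) := by
    rw [hB]; simp
  have hA : (PySem.List.pyRange 0 (flat.length : Int) (width * height)).map
        (fun x => PySem.List.slice flat (some x) (some (x + width * height)))
      = chunks (width * height).toNat flat := sliceChunks (by positivity) flat
  have hwh : (width * height).toNat = width.toNat * height.toNat := by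
    rw [Int.toNat_mul] <;> omega
  rw [hA, hwh]
  have hdist := chunks_chunks (w := width.toNat) (h := height.toNat) (by omega) (by omega) flat
  -- A's per-sheet row slicing is chunks width on each sheet
  have hrows : ∀ L : List (List Int),
      L.foldl (fun sheets sheet => sheets ++ [(PySem.List.pyRange 0 (sheet.length : Int) width).map
        (fun x => PySem.List.slice sheet (some x) (some (x + width)))]) []
      = L.map (chunks width.toNat) := by
    intro L
    rw [show (fun (sheets : List (List (List Int))) (sheet : List Int) => sheets ++
        [(PySem.List.pyRange 0 (sheet.length : Int) width).map
          (fun x => PySem.List.slice sheet (some x) (some (x + width)))])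
      = fun sheets sheet => sheets ++ [chunks width.toNat sheet] by
        funext sheets sheet
        rw [sliceChunks hw sheet]]
    rw [PySem.List.foldl_append_singleton_eq_map]
    simp
  rw [hrows, hdist, ← hBfl]
  rfl
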